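-- pv_equiv track=rewrite | github.com/scorpionbouzid/lbez | zigzag.py | chifdist
-- ===== SOURCE A (Python) =====
-- def chifdist(n):
--     i = 0
--     test = True
--     while i != 10 and test:
--         ch = str(i)+str(i)
--         if str(n).find(ch) == -1:
--             i += 1
--         else :
--             test = False
--     return not test
-- ===== SOURCE B (Python) =====
-- def chifdist(n):
--     s = str(n)
--     for i in range(len(s) - 1):
--         if s[i] == s[i + 1] and s[i].isdigit():
--             return True
--     return False
-- ===== Notes on version B (the rewrite author's own statement) =====
-- stated objective: simpler
-- what changed: Replaces A's ten separate substring scans (one find per doubled digit '00'..'99') with a single left-to-right pass over adjacent character pairs.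
import Mathlib
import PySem

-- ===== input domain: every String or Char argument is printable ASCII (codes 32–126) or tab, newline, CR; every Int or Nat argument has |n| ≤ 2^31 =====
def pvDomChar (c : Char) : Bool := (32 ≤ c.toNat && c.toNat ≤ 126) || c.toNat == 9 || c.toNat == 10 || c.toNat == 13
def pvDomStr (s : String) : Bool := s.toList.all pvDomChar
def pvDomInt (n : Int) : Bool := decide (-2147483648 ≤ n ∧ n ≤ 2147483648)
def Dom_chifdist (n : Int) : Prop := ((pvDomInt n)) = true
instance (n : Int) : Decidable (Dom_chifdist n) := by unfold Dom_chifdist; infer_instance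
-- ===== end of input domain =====

-- B replaces A's ten separate substring scans (one str.find per doubled digit "00".."99") with a single pass over adjacent character pairs; objective: simpler.


-- ===== PORT A =====
-- while i != 10 and test: … — bounded loop (at most 11 iterations), ported with fuel 12
def chifdistGo (s : String) : Nat → Int → Bool → Bool
  | 0, _, test => test
  | f + 1, i, test =>
    if i ≠ 10 ∧ test = true then
      let ch := PySem.Int.toStr i ++ PySem.Int.toStr i
      if PySem.Str.find s ch = -1 then chifdistGo s f (i + 1) test
      else chifdistGo s f i false
    else test

def chifdist (n : Int) : Bool := !(chifdistGo (PySem.Int.toStr n) 12 0 true)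

-- ===== PORT B =====
-- for i in range(len(s)-1): if s[i] == s[i+1] and s[i].isdigit(): return True — recursion over adjacent pairs
def chifdistPairs : List Char → Bool
  | a :: b :: t => if a == b && PySem.Chars.isdigit a then true else chifdistPairs (b :: t)
  | _ => false

def chifdist_alt (n : Int) : Bool := chifdistPairs (PySem.Int.toStr n).toList

-- ===== PRECONDITION & SPEC =====
def Spec_chifdist (n : Int) (out : Bool) : Prop := out = chifdist_alt n
instance (n : Int) (out : Bool) : Decidable (Spec_chifdist n out) := by unfold Spec_chifdist; infer_instance

-- ===== CLAIM (what is proved, stated in full; the proofs are below) =====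
def Claim_equal_chifdist : Prop := ∀ (n : Int), Dom_chifdist n → Spec_chifdist n (chifdist n)

-- ===== LEMMAS AND PROOFS =====

lemma char_eq_of_toNat {d c : Char} (h : d.val.toNat = c.val.toNat) : d = c :=
  Char.ext (UInt32.toNat_inj.mp h)

-- Python's c.isdigit() (ASCII) holds exactly for the ten digit characters A scans for.
lemma isdigit_mem (d : Char) :
    PySem.Chars.isdigit d = true ↔ d ∈ (['0','1','2','3','4','5','6','7','8','9'] : List Char) := by
  simp only [PySem.Chars.isdigit, Bool.and_eq_true, decide_eq_true_eq, Char.le_def,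
    UInt32.le_iff_toNat_le, List.mem_cons, List.not_mem_nil, or_false]
  constructor
  · rintro ⟨h1, h2⟩
    have c0 : ('0' : Char).val.toNat = 48 := rfl
    have c9 : ('9' : Char).val.toNat = 57 := rfl
    rw [c0] at h1; rw [c9] at h2
    have hv : d.val.toNat = 48 ∨ d.val.toNat = 49 ∨ d.val.toNat = 50 ∨ d.val.toNat = 51 ∨
        d.val.toNat = 52 ∨ d.val.toNat = 53 ∨ d.val.toNat = 54 ∨ d.val.toNat = 55 ∨
        d.val.toNat = 56 ∨ d.val.toNat = 57 := by omega
    rcases hv with h|h|h|h|h|h|h|h|h|h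
    · exact Or.inl (char_eq_of_toNat (c := '0') h)
    · exact Or.inr (Or.inl (char_eq_of_toNat (c := '1') h))
    · exact Or.inr (Or.inr (Or.inl (char_eq_of_toNat (c := '2') h)))
    · exact Or.inr (Or.inr (Or.inr (Or.inl (char_eq_of_toNat (c := '3') h))))
    · exact Or.inr (Or.inr (Or.inr (Or.inr (Or.inl (char_eq_of_toNat (c := '4') h)))))
    · exact Or.inr (Or.inr (Or.inr (Or.inr (Or.inr (Or.inl (char_eq_of_toNat (c := '5') h))))))
    · exact Or.inr (Or.inr (Or.inr (Or.inr (Or.inr (Or.inr (Or.inl (char_eq_of_toNat (c := '6') h)))))))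
    · exact Or.inr (Or.inr (Or.inr (Or.inr (Or.inr (Or.inr (Or.inr (Or.inl (char_eq_of_toNat (c := '7') h))))))))
    · exact Or.inr (Or.inr (Or.inr (Or.inr (Or.inr (Or.inr (Or.inr (Or.inr (Or.inl (char_eq_of_toNat (c := '8') h)))))))))
    · exact Or.inr (Or.inr (Or.inr (Or.inr (Or.inr (Or.inr (Or.inr (Or.inr (Or.inr (char_eq_of_toNat (c := '9') h)))))))))
  · rintro (h|h|h|h|h|h|h|h|h|h) <;> subst h <;> decide

-- B's pass finds an adjacent equal digit pair iff some doubled digit occurs as an infix.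
lemma pairs_iff (s : List Char) :
    chifdistPairs s = true ↔ ∃ d, PySem.Chars.isdigit d = true ∧ [d, d] <:+: s := by
  induction s with
  | nil => simp [chifdistPairs]
  | cons a t ih =>
    cases t with
    | nil =>
      constructor
      · intro h; simp [chifdistPairs] at h
      · rintro ⟨d, -, p, q, hpq⟩
        have := congrArg List.length hpq
        simp at this
        omega
    | cons b u =>
      rw [chifdistPairs]
      constructor
      · intro h
        split_ifs at h with hc
        · rw [Bool.and_eq_true, beq_iff_eq] at hc
          exact ⟨a, hc.2, ⟨[], u, by simp [hc.1]⟩⟩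
        · obtain ⟨d, hd, p, q, hpq⟩ := ih.mp h
          exact ⟨d, hd, a :: p, q, by simp [hpq]⟩
      · rintro ⟨d, hd, p, q, hpq⟩
        cases p with
        | nil =>
          simp only [List.nil_append, List.cons_append, List.cons.injEq] at hpq
          obtain ⟨h1, h2, -⟩ := hpq
          rw [if_pos (by subst h1; simp [← h2, hd])]
        | cons x p' =>
          simp only [List.cons_append, List.cons.injEq] at hpq
          obtain ⟨-, hpq⟩ := hpq
          split
          · rfl
          · exact ih.mpr ⟨d, hd, p', q, hpq⟩

-- A's loop returns (not test) = true iff some doubled digit "dd" occurs in the string.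
lemma A_iff (s : String) :
    (!(chifdistGo s 12 0 true)) = true ↔
      ∃ d ∈ (['0','1','2','3','4','5','6','7','8','9'] : List Char), [d, d] <:+: s.toList := by
  have e0 : PySem.Int.toChars 0 ++ PySem.Int.toChars 0 = ['0','0'] := by decide
  have e1 : PySem.Int.toChars 1 ++ PySem.Int.toChars 1 = ['1','1'] := by decide
  have e2 : PySem.Int.toChars 2 ++ PySem.Int.toChars 2 = ['2','2'] := by decide
  have e3 : PySem.Int.toChars 3 ++ PySem.Int.toChars 3 = ['3','3'] := by decide
  have e4 : PySem.Int.toChars 4 ++ PySem.Int.toChars 4 = ['4','4'] := by decide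
  have e5 : PySem.Int.toChars 5 ++ PySem.Int.toChars 5 = ['5','5'] := by decide
  have e6 : PySem.Int.toChars 6 ++ PySem.Int.toChars 6 = ['6','6'] := by decide
  have e7 : PySem.Int.toChars 7 ++ PySem.Int.toChars 7 = ['7','7'] := by decide
  have e8 : PySem.Int.toChars 8 ++ PySem.Int.toChars 8 = ['8','8'] := by decide
  have e9 : PySem.Int.toChars 9 ++ PySem.Int.toChars 9 = ['9','9'] := by decide
  simp [chifdistGo, e0, e1, e2, e3, e4, e5, e6, e7, e8, e9,
    PySem.Chars.find_eq_neg_one_iff]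

-- ===== VERDICT (by name: the statement is the Claim_ definition above) =====
theorem chifdist_spec : Claim_equal_chifdist := by
  intro n _
  show chifdist n = chifdist_alt n
  rw [Bool.eq_iff_iff, chifdist, chifdist_alt, A_iff, pairs_iff]
  constructor
  · rintro ⟨d, hmem, hinf⟩
    exact ⟨d, (isdigit_mem d).mpr hmem, hinf⟩
  · rintro ⟨d, hd, hinf⟩
    exact ⟨d, (isdigit_mem d).mp hd, hinf⟩
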